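-- pv_equiv track=rewrite | github.com/IvanArechiga182/TSO-FINAL-PROJECT | MS_K-BEST.py | local_search_optimization
-- ===== SOURCE A (Python) =====
-- def calculate_score(route):
--     return sum(point[2] for point in route)
--
-- def swap_points(route, i, j):
--     route[i], route[j] = route[j], route[i]
--
-- def local_search_optimization(route, time_limit):
--     best_route = route[:]
--     best_score = calculate_score(best_route)
--     improved = True
--
--     while improved:
--         improved = False
--
--         for i in range(len(best_route)):
--             for j in range(i + 1, len(best_route)):
--                 new_route = best_route[:]
--                 swap_points(new_route, i, j)
--                 new_score = calculate_score(new_route)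
--
--                 if new_score > best_score:
--                     best_route = new_route
--                     best_score = new_score
--                     improved = True
--                     break
--
--             if improved:
--                 break
--
--     return best_route, best_score
-- ===== SOURCE B (Python) =====
-- def local_search_optimization(route, time_limit):
--     # Swapping two points never changes the sum of point[2], so A's search
--     # can never improve and always returns a copy of route with its score.
--     return route[:], sum(point[2] for point in route)
-- ===== Notes on version B (the rewrite author's own statement) =====
-- stated objective: simpler
-- what changed: Swaps preserve the route's score (a sum over all points), so A's nested swap search can never improve; B returns a copy of the route and its score computed in one pass.
import Mathlib
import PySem

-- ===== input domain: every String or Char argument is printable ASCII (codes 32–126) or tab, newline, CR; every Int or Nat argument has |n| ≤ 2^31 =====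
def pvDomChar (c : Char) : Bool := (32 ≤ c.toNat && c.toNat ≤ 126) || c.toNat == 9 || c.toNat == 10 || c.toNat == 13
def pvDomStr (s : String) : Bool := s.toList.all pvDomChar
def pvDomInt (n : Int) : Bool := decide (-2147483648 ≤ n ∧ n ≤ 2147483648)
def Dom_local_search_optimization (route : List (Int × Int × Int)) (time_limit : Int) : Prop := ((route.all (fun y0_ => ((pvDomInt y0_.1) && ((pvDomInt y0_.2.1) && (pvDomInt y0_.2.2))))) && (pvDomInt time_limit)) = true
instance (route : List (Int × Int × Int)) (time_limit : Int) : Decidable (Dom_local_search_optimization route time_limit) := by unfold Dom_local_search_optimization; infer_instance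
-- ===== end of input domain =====

-- B replaces A's nested swap search (which can never improve, since swaps preserve the sum) by a single-pass score computation; objective: simpler/faster.


-- ===== PORT A =====
-- sum(point[2] for point in route)
def calculate_score (route : List (Int × Int × Int)) : Int :=
  route.foldl (fun acc p => acc + p.2.2) 0

-- route[i], route[j] = route[j], route[i]; indices produced by the loops are always in range,
-- so the fallback branch is unreachable (it just returns the list unchanged).
def swap_points (xs : List (Int × Int × Int)) (i j : Nat) : List (Int × Int × Int) :=
  match xs[i]?, xs[j]? with
  | some a, some b => (xs.set i b).set j a
  | _, _ => xs

-- inner 'for j in range(i+1, n)': first improving swap, or none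
def lso_innerJ (best : List (Int × Int × Int)) (score : Int) (i : Nat) :
    List Nat → Option (List (Int × Int × Int) × Int)
  | [] => none
  | j :: rest =>
    let new_route := swap_points best i j
    let new_score := calculate_score new_route
    if new_score > score then some (new_route, new_score)
    else lso_innerJ best score i rest

-- outer 'for i in range(n)'
def lso_outerI (best : List (Int × Int × Int)) (score : Int) :
    List Nat → Option (List (Int × Int × Int) × Int)
  | [] => none
  | i :: rest =>
    match lso_innerJ best score i (List.range' (i + 1) (best.length - (i + 1))) with
    | some r => some r
    | none => lso_outerI best score rest

-- 'while improved': fuel-bounded loop; the pass in fact never improves (proved below),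
-- so any positive fuel reproduces Python's behaviour exactly.
def lso_loop : Nat → (List (Int × Int × Int) × Int) → (List (Int × Int × Int) × Int)
  | 0, s => s
  | fuel + 1, (best, score) =>
    match lso_outerI best score (List.range best.length) with
    | some (nb, ns) => lso_loop fuel (nb, ns)
    | none => (best, score)

def local_search_optimization (route : List (Int × Int × Int)) (time_limit : Int) : (List (Int × Int × Int)) × Int :=
  lso_loop (route.length + 1) (route, calculate_score route)

-- ===== PORT B =====
def local_search_optimization_alt (route : List (Int × Int × Int)) (time_limit : Int) : (List (Int × Int × Int)) × Int :=
  (route, (route.map (fun p => p.2.2)).sum)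

-- ===== PRECONDITION & SPEC =====
def Spec_local_search_optimization (route : List (Int × Int × Int)) (time_limit : Int) (out : (List (Int × Int × Int)) × Int) : Prop := out = local_search_optimization_alt route time_limit
instance (route : List (Int × Int × Int)) (time_limit : Int) (out : (List (Int × Int × Int)) × Int) : Decidable (Spec_local_search_optimization route time_limit out) := by unfold Spec_local_search_optimization; infer_instance

-- ===== CLAIM (what is proved, stated in full; the proofs are below) =====
def Claim_equal_local_search_optimization : Prop := ∀ (route : List (Int × Int × Int)) (time_limit : Int), Dom_local_search_optimization route time_limit → Spec_local_search_optimization route time_limit (local_search_optimization route time_limit)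

-- ===== LEMMAS AND PROOFS =====

theorem calc_score_aux (l : List (Int × Int × Int)) (init : Int) :
    l.foldl (fun acc p => acc + p.2.2) init = init + (l.map (fun p => p.2.2)).sum := by
  induction l generalizing init with
  | nil => simp
  | cons h t ih => simp [ih]; ring

theorem calc_score_eq_sum (l : List (Int × Int × Int)) :
    calculate_score l = (l.map (fun p => p.2.2)).sum := by
  unfold calculate_score; rw [calc_score_aux]; ring

theorem int_sum_set (l : List Int) (i : Nat) (a : Int) (h : i < l.length) :
    (l.set i a).sum = l.sum - l[i] + a := by
  induction l generalizing i with
  | nil => simp at h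
  | cons x t ih =>
    cases i with
    | zero => simp; ring
    | succ n =>
      simp only [List.set_cons_succ, List.sum_cons]
      rw [ih n (by simpa using h)]
      simp only [List.getElem_cons_succ]
      ring

theorem score_swap (xs : List (Int × Int × Int)) (i j : Nat) (hij : i ≠ j) :
    calculate_score (swap_points xs i j) = calculate_score xs := by
  unfold swap_points
  cases hi : xs[i]? with
  | none => simp
  | some a =>
    cases hj : xs[j]? with
    | none => simp
    | some b =>
      have hi' : i < xs.length := (List.getElem?_eq_some_iff.mp hi).1
      have hj' : j < xs.length := (List.getElem?_eq_some_iff.mp hj).1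
      have ha : xs[i] = a := by
        have := (List.getElem?_eq_some_iff.mp hi).2; simpa using this
      have hb : xs[j] = b := by
        have := (List.getElem?_eq_some_iff.mp hj).2; simpa using this
      simp only [calc_score_eq_sum]
      rw [List.map_set, List.map_set]
      rw [int_sum_set _ j _ (by simpa), int_sum_set _ i _ (by simpa)]
      rw [List.getElem_set_ne (by omega)]
      simp [ha, hb]

theorem innerJ_none (best : List (Int × Int × Int)) (i : Nat) (l : List Nat)
    (hl : ∀ j ∈ l, i ≠ j) :
    lso_innerJ best (calculate_score best) i l = none := by
  induction l with
  | nil => rfl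
  | cons j rest ih =>
    unfold lso_innerJ
    simp only [score_swap best i j (hl j (by simp)), gt_iff_lt, lt_irrefl, if_false]
    exact ih (fun x hx => hl x (by simp [hx]))

theorem outerI_none (best : List (Int × Int × Int)) (l : List Nat) :
    lso_outerI best (calculate_score best) l = none := by
  induction l with
  | nil => rfl
  | cons i rest ih =>
    unfold lso_outerI
    rw [innerJ_none best i _ (by
      intro j hj
      have := List.mem_range'.mp hj
      omega)]
    exact ih

theorem loop_fixed (fuel : Nat) (best : List (Int × Int × Int)) :
    lso_loop fuel (best, calculate_score best) = (best, calculate_score best) := by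
  cases fuel with
  | zero => rfl
  | succ n =>
    unfold lso_loop
    rw [outerI_none]

-- ===== VERDICT (by name: the statement is the Claim_ definition above) =====
theorem local_search_optimization_spec : Claim_equal_local_search_optimization := by
  intro route time_limit _
  unfold Spec_local_search_optimization local_search_optimization local_search_optimization_alt
  rw [loop_fixed, calc_score_eq_sum]
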